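-- pv_equiv track=rewrite | github.com/iancyw/university-assignments | FIT1045/Assignment 2/hiring.py | skills
-- ===== SOURCE A (Python) =====
-- def skills(candidates):
--     skills_list = []
--     n = len(candidates)
--     for i in range(n):
--         for j in range(len(candidates[i][0])):
--             if candidates[i][0][j] not in skills_list:
--                 skills_list.append(candidates[i][0][j])
--     return skills_list
-- ===== SOURCE B (Python) =====
-- def skills(candidates):
--     flat = [s for c in candidates for s in c[0]]
--     return [s for i, s in enumerate(flat) if flat.index(s) == i]
-- ===== Notes on version B (the rewrite author's own statement) =====
-- stated objective: alternative
-- what changed: Replaces the incremental nested loop that scans the growing result before each append with a build-then-filter decomposition: first flatten all skill lists into one list, then keep each element only at its first global position (flat.index(s) == i).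
import Mathlib
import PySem

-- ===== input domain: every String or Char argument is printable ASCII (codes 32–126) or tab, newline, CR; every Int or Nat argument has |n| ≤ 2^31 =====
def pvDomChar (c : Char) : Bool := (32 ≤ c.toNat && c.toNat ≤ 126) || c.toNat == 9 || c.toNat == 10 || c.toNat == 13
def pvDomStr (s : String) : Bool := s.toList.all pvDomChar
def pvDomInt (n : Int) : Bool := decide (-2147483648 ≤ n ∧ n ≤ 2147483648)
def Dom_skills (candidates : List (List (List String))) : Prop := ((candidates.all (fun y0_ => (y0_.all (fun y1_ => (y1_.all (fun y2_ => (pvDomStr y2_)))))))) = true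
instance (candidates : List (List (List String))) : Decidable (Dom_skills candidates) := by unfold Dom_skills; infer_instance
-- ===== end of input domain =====

-- B builds the flat list of all skills first and then keeps each skill only at
-- its first global position (flat.index(s) == i), instead of A's incremental
-- scan-the-growing-result-then-append nested loop; same cost class, different
-- decomposition.

-- ===== PORT A =====
def skills (candidates : List (List (List String))) : List String :=
  (PySem.List.pyRange 0 (candidates.length : Int) 1).foldl (fun skillsList i =>
    (PySem.List.pyRange 0 ((PySem.List.pyGetD (PySem.List.pyGetD candidates i []) 0 []).length : Int) 1).foldl
      (fun acc j =>
        let s := PySem.List.pyGetD (PySem.List.pyGetD (PySem.List.pyGetD candidates i []) 0 []) j ""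
        if acc.contains s then acc else acc ++ [s])
      skillsList) []

-- ===== PORT B =====
def skills_alt (candidates : List (List (List String))) : List String :=
  let flat := candidates.flatMap (fun c => PySem.List.pyGetD c 0 [])
  (PySem.List.enumerate flat).filterMap (fun q =>
    if (PySem.List.index? flat q.2).map Int.ofNat = some q.1 then some q.2 else none)

-- ===== PRECONDITION & SPEC =====
-- Pre_ excludes exactly the inputs containing an empty candidate, on which both
-- A and B raise IndexError at c[0].
def Pre_skills (candidates : List (List (List String))) : Prop :=
  ∀ c ∈ candidates, c ≠ []
instance (candidates : List (List (List String))) : Decidable (Pre_skills candidates) := by unfold Pre_skills; infer_instance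

def pvWitness_skills : List (List (List String)) := [[["python", "sql"]], [["sql"], ["c"]]]

def Spec_skills (candidates : List (List (List String))) (out : List String) : Prop := out = skills_alt candidates
instance (candidates : List (List (List String))) (out : List String) : Decidable (Spec_skills candidates out) := by unfold Spec_skills; infer_instance

-- ===== CLAIM (what is proved, stated in full; the proofs are below) =====
def Claim_equal_skills : Prop := ∀ (candidates : List (List (List String))), Dom_skills candidates → Pre_skills candidates → Spec_skills candidates (skills candidates)

-- ===== LEMMAS AND PROOFS =====

-- the list of first occurrences of l relative to already-seen prefix p
def firstNew (p : List String) : List String → List String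
  | [] => []
  | a :: t => (if a ∈ p then [] else [a]) ++ firstNew (p ++ [a]) t

-- firstNew depends on the seen prefix only through membership
theorem firstNew_congr : ∀ (l p q : List String), (∀ x, x ∈ p ↔ x ∈ q) →
    firstNew p l = firstNew q l := by
  intro l
  induction l with
  | nil => intro p q _; rfl
  | cons a t ih =>
      intro p q h
      simp only [firstNew, h a]
      congr 1
      exact ih _ _ (fun x => by simp [h x])

-- A's accumulator loop computes the seen prefix plus the new first occurrences
theorem foldl_add_eq_firstNew : ∀ (l p : List String),
    l.foldl PySem.Set.add p = p ++ firstNew p l := by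
  intro l
  induction l with
  | nil => intro p; simp [firstNew]
  | cons a t ih =>
      intro p
      by_cases h : a ∈ p
      · have hadd : PySem.Set.add p a = p := by simp [PySem.Set.add, PySem.Set.contains, h]
        simp only [List.foldl_cons, hadd, firstNew, h, if_pos, List.nil_append]
        rw [ih p, firstNew_congr t p (p ++ [a]) (fun x => by simp; intro hx; rw [hx]; exact h)]
      · have hadd : PySem.Set.add p a = p ++ [a] := by simp [PySem.Set.add, PySem.Set.contains, h]
        simp only [List.foldl_cons, hadd, firstNew, h, if_neg, not_false_iff]
        rw [ih (p ++ [a])]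
        simp

-- B's positional filter computes the same first occurrences
theorem filter_index_eq_firstNew : ∀ (l p : List String),
    (PySem.List.enumerate l (p.length : Int)).filterMap (fun q =>
        if (PySem.List.index? (p ++ l) q.2).map Int.ofNat = some q.1 then some q.2 else none)
      = firstNew p l := by
  intro l
  induction l with
  | nil => intro p; simp [PySem.List.enumerate_nil, firstNew]
  | cons a t ih =>
      intro p
      rw [PySem.List.enumerate_cons]
      simp only [List.filterMap_cons]
      have hsplit : p ++ a :: t = (p ++ [a]) ++ t := by simp
      have hlen : (((p ++ [a]).length : Nat) : Int) = (p.length : Int) + 1 := by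
        simp
      have htail : (PySem.List.enumerate t ((p.length : Int) + 1)).filterMap (fun q =>
          if (PySem.List.index? (p ++ a :: t) q.2).map Int.ofNat = some q.1 then some q.2 else none)
          = firstNew (p ++ [a]) t := by
        rw [hsplit, ← hlen]
        exact ih (p ++ [a])
      by_cases h : a ∈ p
      · -- a already occurred in p: its first index is < p.length, so it is dropped
        obtain ⟨k, hk⟩ := Option.isSome_iff_exists.mp ((PySem.List.index?_isSome_iff p a).mpr h)
        have hklt : k < p.length := by
          obtain ⟨pre, suf, hp, hlenp, -⟩ := (PySem.List.index?_eq_some_iff p a k).mp hk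
          subst hp
          simp [← hlenp]
        have hidx : PySem.List.index? (p ++ a :: t) a = some k := by
          rw [PySem.List.index?_append_of_mem _ h, hk]
        have hcond : ((PySem.List.index? (p ++ a :: t) a).map Int.ofNat = some (p.length : Int)) = False := by
          rw [hidx]
          simp only [Option.map_some, Option.some.injEq, eq_iff_iff, iff_false,
            Int.ofNat_eq_natCast]
          omega
        simp only [hcond, if_false, htail, firstNew, h, if_pos, List.nil_append]
      · -- a is new: its first index is exactly p.length, so it is kept
        have hidx : PySem.List.index? (p ++ a :: t) a = some p.length := by
          rw [hsplit, PySem.List.index?_append_of_mem t (show a ∈ p ++ [a] by simp)]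
          exact PySem.List.index?_append_singleton_self p a h
        have hcond : ((PySem.List.index? (p ++ a :: t) a).map Int.ofNat = some (p.length : Int)) = True := by
          rw [hidx]
          simp
        simp only [hcond, if_true, htail, firstNew, h, if_neg, not_false_iff, List.singleton_append]

-- folding over a flattened list is the nested fold (specific loop shape of A vs B)
theorem foldl_flatMap_eq {α β γ : Type} (f : α → List β) (g : γ → β → γ) :
    ∀ (l : List α) (init : γ),
      (l.flatMap f).foldl g init = l.foldl (fun acc a => (f a).foldl g acc) init := by
  intro l
  induction l with
  | nil => intro init; rfl
  | cons h t ih =>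
      intro init
      simp only [List.flatMap_cons, List.foldl_append, List.foldl_cons]
      exact ih _

-- ===== VERDICT (by name: the statement is the Claim_ definition above) =====
theorem skills_spec : Claim_equal_skills := by
  intro candidates _ _
  unfold Spec_skills skills skills_alt
  rw [PySem.List.foldl_pyRange_zero_pyGetD' candidates []
        (fun skillsList ci =>
          (PySem.List.pyRange 0 ((PySem.List.pyGetD ci 0 []).length : Int) 1).foldl
            (fun acc j =>
              let s := PySem.List.pyGetD (PySem.List.pyGetD ci 0 []) j ""
              if acc.contains s then acc else acc ++ [s]) skillsList) []]
  have hinner : (fun (skillsList : List String) (ci : List (List String)) =>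
      (PySem.List.pyRange 0 ((PySem.List.pyGetD ci 0 []).length : Int) 1).foldl
        (fun acc j =>
          let s := PySem.List.pyGetD (PySem.List.pyGetD ci 0 []) j ""
          if acc.contains s then acc else acc ++ [s]) skillsList)
      = fun skillsList ci => (PySem.List.pyGetD ci 0 []).foldl PySem.Set.add skillsList := by
    funext skillsList ci
    exact PySem.List.foldl_pyRange_zero_pyGetD' (PySem.List.pyGetD ci 0 []) "" PySem.Set.add skillsList
  rw [hinner,
    ← foldl_flatMap_eq (fun c => PySem.List.pyGetD c 0 []) PySem.Set.add,
    foldl_add_eq_firstNew, List.nil_append,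
    ← filter_index_eq_firstNew (candidates.flatMap (fun c => PySem.List.pyGetD c 0 [])) []]
  simp
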